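-- pv_equiv track=rewrite | github.com/benrich37/crawfish | build/lib/crawfish/core/elecdata.py | orbs_idx_dict_helper
-- ===== SOURCE A (Python) =====
-- def orbs_idx_dict_helper(ion_names: list[str], ion_counts: list[int], norbsperatom: list[int]) -> dict:
--     """Return a dictionary mapping orbital indices to atom labels.
--
--     Returns a dictionary mapping each atom (using key of format 'el #n' (str),
--     where el is atom id, and n is number of specific atom as it appears in JDFTx
--     out file using 1-based indexing) to indices (int) of all atomic orbital
--     projections (in 0-based indexing) belonging to said atom.
--
--     Parameters
--     ----------
--     ion_names : list[str]
--         List of atom labels.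
--     ion_counts : list[int]
--         List of atom counts.
--     norbsperatom : list[int]
--         List of number of orbitals per atom.
--
--     Returns
--     -------
--     orbs_dict_out : dict
--         Dictionary mapping atom labels to orbital indices.
--     """
--     orbs_dict_out = {}
--     iOrb = 0
--     atom = 0
--     for i, count in enumerate(ion_counts):
--         for atom_num in range(count):
--             atom_label = ion_names[i] + " #" + str(atom_num + 1)
--             norbs = norbsperatom[atom]
--             orbs_dict_out[atom_label] = list(range(iOrb, iOrb + norbs))
--             iOrb += norbs
--             atom += 1
--     return orbs_dict_out
-- ===== SOURCE B (Python) =====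
-- def orbs_idx_dict_helper(ion_names: list[str], ion_counts: list[int], norbsperatom: list[int]) -> dict:
--     labels = [
--         ion_names[i] + " #" + str(n)
--         for i, count in enumerate(ion_counts)
--         for n in range(1, count + 1)
--     ]
--     starts = [0]
--     for a in range(len(labels)):
--         starts.append(starts[-1] + norbsperatom[a])
--     return {lab: list(range(starts[a], starts[a + 1])) for a, lab in enumerate(labels)}
-- ===== Notes on version B (the rewrite author's own statement) =====
-- stated objective: alternative
-- what changed: Replaces A's single threaded nested loop (running dict + iOrb + atom counters) with three separate passes: expand the ordered label list, build an orbital-start offset table as a prefix sum, then assemble the dict by pairing each label with its range; same O(n) cost.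
import Mathlib
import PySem

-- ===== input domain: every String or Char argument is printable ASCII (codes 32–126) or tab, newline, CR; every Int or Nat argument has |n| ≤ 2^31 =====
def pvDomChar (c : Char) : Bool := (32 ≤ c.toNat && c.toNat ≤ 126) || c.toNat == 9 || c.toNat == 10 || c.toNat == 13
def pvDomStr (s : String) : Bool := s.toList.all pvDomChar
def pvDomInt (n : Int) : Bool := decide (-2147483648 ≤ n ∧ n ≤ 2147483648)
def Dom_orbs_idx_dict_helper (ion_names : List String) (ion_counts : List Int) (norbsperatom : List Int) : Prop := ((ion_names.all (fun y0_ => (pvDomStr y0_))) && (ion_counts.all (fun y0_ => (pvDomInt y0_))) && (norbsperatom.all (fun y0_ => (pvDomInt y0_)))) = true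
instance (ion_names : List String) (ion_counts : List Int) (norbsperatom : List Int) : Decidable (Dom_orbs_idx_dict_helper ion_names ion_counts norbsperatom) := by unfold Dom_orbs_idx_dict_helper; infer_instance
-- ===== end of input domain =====

-- B restructures A's single nested loop into three passes (label expansion, prefix-sum offset table, dict assembly); return values agree on all of Pre_.

-- ===== PORT A =====
def orbs_idx_dict_helper (ion_names : List String) (ion_counts : List Int) (norbsperatom : List Int) : List (String × List Int) :=
  let fin := (PySem.List.enumerate ion_counts).foldl
    (fun (st : PySem.Dict String (List Int) × Int × Int) ic =>
      (PySem.List.pyRange 0 ic.2 1).foldl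
        (fun st2 atom_num =>
          let atom_label := PySem.List.pyGetD ion_names ic.1 "" ++ " #" ++ PySem.Int.toStr (atom_num + 1)
          let norbs := PySem.List.pyGetD norbsperatom st2.2.2 0
          (st2.1.insert atom_label (PySem.List.pyRange st2.2.1 (st2.2.1 + norbs) 1),
           st2.2.1 + norbs, st2.2.2 + 1)) st)
    (PySem.Dict.empty, 0, 0)
  fin.1.items

-- ===== PORT B =====
def altLabels (ion_names : List String) (ion_counts : List Int) : List String :=
  (PySem.List.enumerate ion_counts).flatMap (fun ic =>
    (PySem.List.pyRange 1 (ic.2 + 1) 1).map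
      (fun n => PySem.List.pyGetD ion_names ic.1 "" ++ " #" ++ PySem.Int.toStr n))

def altStarts (norbsperatom : List Int) (numLabels : Nat) : List Int :=
  (PySem.List.pyRange 0 (numLabels : Int) 1).foldl
    (fun starts a => starts ++ [PySem.List.pyGetD starts (-1) 0 + PySem.List.pyGetD norbsperatom a 0])
    [0]

def orbs_idx_dict_helper_alt (ion_names : List String) (ion_counts : List Int) (norbsperatom : List Int) : List (String × List Int) :=
  let labels := altLabels ion_names ion_counts
  let starts := altStarts norbsperatom labels.length
  ((PySem.List.enumerate labels).foldl
    (fun (d : PySem.Dict String (List Int)) al =>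
      d.insert al.2 (PySem.List.pyRange (PySem.List.pyGetD starts al.1 0) (PySem.List.pyGetD starts (al.1 + 1) 0) 1))
    PySem.Dict.empty).items

-- ===== PRECONDITION & SPEC =====
-- Pre_ excludes exactly the inputs where the Python raises IndexError: some positive
-- count at position i with no ion_names[i], or fewer norbsperatom entries than atoms.
def Pre_orbs_idx_dict_helper (ion_names : List String) (ion_counts : List Int) (norbsperatom : List Int) : Prop :=
  (∀ i, i < ion_counts.length → 0 < ion_counts.getD i 0 → i < ion_names.length) ∧
  (ion_counts.map Int.toNat).sum ≤ norbsperatom.length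

instance (ion_names : List String) (ion_counts : List Int) (norbsperatom : List Int) : Decidable (Pre_orbs_idx_dict_helper ion_names ion_counts norbsperatom) := by unfold Pre_orbs_idx_dict_helper; infer_instance

def pvWitness_orbs_idx_dict_helper : List String × List Int × List Int := (["H", "O"], [2, 1], [1, 2, 3])

def Spec_orbs_idx_dict_helper (ion_names : List String) (ion_counts : List Int) (norbsperatom : List Int) (out : List (String × List Int)) : Prop := out = orbs_idx_dict_helper_alt ion_names ion_counts norbsperatom
instance (ion_names : List String) (ion_counts : List Int) (norbsperatom : List Int) (out : List (String × List Int)) : Decidable (Spec_orbs_idx_dict_helper ion_names ion_counts norbsperatom out) := by unfold Spec_orbs_idx_dict_helper; infer_instance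

-- ===== CLAIM (what is proved, stated in full; the proofs are below) =====
def Claim_equal_orbs_idx_dict_helper : Prop := ∀ (ion_names : List String) (ion_counts : List Int) (norbsperatom : List Int), Dom_orbs_idx_dict_helper ion_names ion_counts norbsperatom → Pre_orbs_idx_dict_helper ion_names ion_counts norbsperatom → Spec_orbs_idx_dict_helper ion_names ion_counts norbsperatom (orbs_idx_dict_helper ion_names ion_counts norbsperatom)

-- ===== LEMMAS AND PROOFS =====

-- Common reference loop: process a list of labels threading (dict, iOrb, atom).
def run (norbs : List Int) (st : PySem.Dict String (List Int) × Int × Int) : List String → PySem.Dict String (List Int) × Int × Int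
  | [] => st
  | lab :: rest =>
      run norbs
        (st.1.insert lab (PySem.List.pyRange st.2.1 (st.2.1 + PySem.List.pyGetD norbs st.2.2 0) 1),
         st.2.1 + PySem.List.pyGetD norbs st.2.2 0, st.2.2 + 1) rest

lemma run_append (norbs : List Int) (xs ys : List String) (st : PySem.Dict String (List Int) × Int × Int) :
    run norbs st (xs ++ ys) = run norbs (run norbs st xs) ys := by
  induction xs generalizing st with
  | nil => simp [run]
  | cons x xs ih => simp [run, ih]

-- A's inner loop over any index list equals `run` over the mapped labels.
lemma inner_eq_run (name : String) (norbs : List Int) (ks : List Int)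
    (st : PySem.Dict String (List Int) × Int × Int) :
    ks.foldl
      (fun st2 k =>
        (st2.1.insert (name ++ " #" ++ PySem.Int.toStr (k + 1))
          (PySem.List.pyRange st2.2.1 (st2.2.1 + PySem.List.pyGetD norbs st2.2.2 0) 1),
         st2.2.1 + PySem.List.pyGetD norbs st2.2.2 0, st2.2.2 + 1)) st
    = run norbs st (ks.map (fun k => name ++ " #" ++ PySem.Int.toStr (k + 1))) := by
  induction ks generalizing st with
  | nil => simp [run]
  | cons k ks ih => simp [run, ih]

-- range(count) labels of A = range(1, count+1) labels of B.
lemma labels_shift (name : String) (c : Int) :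
    (PySem.List.pyRange 0 c 1).map (fun k => name ++ " #" ++ PySem.Int.toStr (k + 1))
    = (PySem.List.pyRange 1 (c + 1) 1).map (fun n => name ++ " #" ++ PySem.Int.toStr n) := by
  rw [PySem.List.pyRange_one 0 c, PySem.List.pyRange_one 1 (c + 1)]
  simp only [List.map_map]
  have : (c - 0).toNat = (c + 1 - 1).toNat := by omega
  rw [this]
  refine List.map_congr_left (fun k _ => ?_)
  simp [add_comm, Function.comp]

-- A's outer fold equals `run` over the flattened labels, from any enumerate start.
lemma a_fold_eq_run (ion_names : List String) (norbs : List Int) (cs : List Int) (s : Int)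
    (st : PySem.Dict String (List Int) × Int × Int) :
    (PySem.List.enumerate cs s).foldl
      (fun (st : PySem.Dict String (List Int) × Int × Int) ic =>
        (PySem.List.pyRange 0 ic.2 1).foldl
          (fun st2 atom_num =>
            (st2.1.insert (PySem.List.pyGetD ion_names ic.1 "" ++ " #" ++ PySem.Int.toStr (atom_num + 1))
              (PySem.List.pyRange st2.2.1 (st2.2.1 + PySem.List.pyGetD norbs st2.2.2 0) 1),
             st2.2.1 + PySem.List.pyGetD norbs st2.2.2 0, st2.2.2 + 1)) st) st
    = run norbs st
        ((PySem.List.enumerate cs s).flatMap (fun ic =>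
          (PySem.List.pyRange 1 (ic.2 + 1) 1).map
            (fun n => PySem.List.pyGetD ion_names ic.1 "" ++ " #" ++ PySem.Int.toStr n))) := by
  induction cs generalizing s st with
  | nil => simp [PySem.List.enumerate_nil, run]
  | cons c cs ih =>
      rw [PySem.List.enumerate_cons]
      simp only [List.foldl_cons, List.flatMap_cons]
      rw [run_append, ih, inner_eq_run, labels_shift]

-- partial sums of norbsperatom (with Python's out-of-range behaviour excluded by Pre_,
-- matched here by the shared default 0).
def sumTo (norbs : List Int) : Nat → Int
  | 0 => 0
  | a + 1 => sumTo norbs a + PySem.List.pyGetD norbs (a : Int) 0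

lemma altStarts_eq (norbs : List Int) (n : Nat) :
    altStarts norbs n = (List.range (n + 1)).map (sumTo norbs) := by
  induction n with
  | zero => simp [altStarts, sumTo]
  | succ n ih =>
      unfold altStarts at ih ⊢
      rw [show ((n + 1 : Nat) : Int) = (n : Int) + 1 by push_cast; ring,
        PySem.List.pyRange_one_succ_right (by positivity)]
      rw [List.foldl_append, ih, List.foldl_cons, List.foldl_nil]
      have h : ∀ m : Nat, (List.range (m + 1)).map (sumTo norbs)
          = (List.range m).map (sumTo norbs) ++ [sumTo norbs m] := by
        intro m; rw [List.range_succ]; simp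
      rw [h (n + 1), h n, PySem.List.pyGetD_neg_one_append_singleton]
      simp [sumTo]

lemma starts_getD (norbs : List Int) (n a : Nat) (h : a ≤ n) :
    PySem.List.pyGetD (altStarts norbs n) (a : Int) 0 = sumTo norbs a := by
  rw [altStarts_eq, PySem.List.pyGetD_natCast]
  rw [List.getD_eq_getElem?_getD, List.getElem?_map, List.getElem?_range (by omega)]
  simp

-- B's assembly fold equals `run`, starting at atom index a.
lemma b_fold_eq_run (norbs : List Int) (n : Nat) (ls : List String) (a : Nat)
    (hlen : a + ls.length ≤ n) (d : PySem.Dict String (List Int)) :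
    (PySem.List.enumerate ls (a : Int)).foldl
      (fun (d : PySem.Dict String (List Int)) al =>
        d.insert al.2 (PySem.List.pyRange (PySem.List.pyGetD (altStarts norbs n) al.1 0)
          (PySem.List.pyGetD (altStarts norbs n) (al.1 + 1) 0) 1)) d
    = (run norbs (d, sumTo norbs a, (a : Int)) ls).1 := by
  induction ls generalizing a d with
  | nil => simp [PySem.List.enumerate_nil, run]
  | cons l ls ih =>
      rw [PySem.List.enumerate_cons, List.foldl_cons]
      have hcast : ((a : Int) + 1) = ((a + 1 : Nat) : Int) := by push_cast; ring
      rw [hcast]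
      rw [starts_getD norbs n a (by simp at hlen; omega),
        starts_getD norbs n (a + 1) (by simp at hlen; omega)]
      rw [ih (a + 1) (by simp at hlen ⊢; omega)]
      simp [run, sumTo]

-- ===== VERDICT (by name: the statement is the Claim_ definition above) =====
theorem orbs_idx_dict_helper_spec : Claim_equal_orbs_idx_dict_helper := by
  intro ion_names ion_counts norbsperatom _ _
  unfold Spec_orbs_idx_dict_helper orbs_idx_dict_helper orbs_idx_dict_helper_alt
  dsimp only
  rw [a_fold_eq_run ion_names norbsperatom ion_counts 0]
  have hb := b_fold_eq_run norbsperatom (altLabels ion_names ion_counts).length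
    (altLabels ion_names ion_counts) 0 (by omega) PySem.Dict.empty
  simp only [Nat.cast_zero] at hb
  rw [hb]
  simp [altLabels, sumTo]
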